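-- pv_equiv track=rewrite | github.com/YoC00lig/Algorithms-and-data-structures | Labs/lab6/zad4.py | zbigniew1
-- ===== SOURCE A (Python) =====
-- from queue import PriorityQueue
--
-- def zbigniew1(A):
--     n = len(A)
--     q = PriorityQueue()
--     q.put((-A[0], 0))
--     energy = 0
--     last = 0
--     cnt = 0
--     result = []
--     while q.qsize() > 0:
--         snack, ind = q.get()
--         cnt += 1
--         energy -= snack
--         result.append(ind)
--         if energy >= n - 1:
--             break
--         for i in range(last + 1, energy + 1):
--             if A[i] > 0:
--                 q.put((-A[i], i))
--         last = energy
--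
--     if energy < n - 1:
--         return -1
--     return cnt
-- ===== SOURCE B (Python) =====
-- def zbigniew1(A):
--     n = len(A)
--     energy = A[0]
--     cnt = 1
--     reached = 0
--     avail = []
--     while energy < n - 1:
--         for i in range(reached + 1, energy + 1):
--             if A[i] > 0:
--                 avail.append(i)
--         reached = energy
--         if not avail:
--             return -1
--         best = max(avail, key=lambda i: (A[i], -i))
--         avail.remove(best)
--         cnt += 1
--         energy += A[best]
--     return cnt
-- ===== Notes on version B (the rewrite author's own statement) =====
-- stated objective: simpler
-- what changed: Replaces the PriorityQueue (heap of negated values) with a plain candidate list: newly reachable positive snacks are appended once, and each round a single linear scan picks the not-yet-eaten snack with maximum A[i] (ties to the smallest index); index 0 is eaten up front, removing A's negation trick, dead result list and queue machinery.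
import Mathlib
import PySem

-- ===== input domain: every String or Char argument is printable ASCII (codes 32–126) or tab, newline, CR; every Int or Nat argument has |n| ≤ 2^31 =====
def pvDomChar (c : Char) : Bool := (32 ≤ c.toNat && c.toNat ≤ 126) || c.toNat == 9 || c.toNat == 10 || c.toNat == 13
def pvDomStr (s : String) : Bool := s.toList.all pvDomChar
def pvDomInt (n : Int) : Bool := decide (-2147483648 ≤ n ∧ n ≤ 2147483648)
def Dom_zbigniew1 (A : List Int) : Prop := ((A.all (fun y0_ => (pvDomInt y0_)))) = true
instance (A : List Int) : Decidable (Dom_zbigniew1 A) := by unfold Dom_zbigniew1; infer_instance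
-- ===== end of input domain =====

-- B replaces A's PriorityQueue with a plain candidate list scanned for the best snack each
-- round: same return value, no queue machinery (objective: simpler; not measured faster).

-- ===== PORT A =====
-- A[i] as a total helper; the `none` (IndexError) case never occurs on the indices A reads.
def pvAget (A : List Int) (i : Int) : Int := (PySem.List.pyGet? A i).getD 0

-- lexicographic ≤ on the (priority, index) pairs the PriorityQueue orders by
def pvLeq (x m : Int × Int) : Bool := decide (x.1 < m.1 ∨ (x.1 = m.1 ∧ x.2 ≤ m.2))

-- q.get(): remove and return the smallest pair (PriorityQueue semantics over the list of entries)
def pvQGet : List (Int × Int) → Option ((Int × Int) × List (Int × Int))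
  | [] => none
  | x :: xs =>
    match pvQGet xs with
    | none => some (x, [])
    | some (m, rest) => if pvLeq x m then some (x, xs) else some (m, x :: rest)

-- the inner `for i in range(last+1, energy+1): if A[i] > 0: q.put((-A[i], i))`
def pvPushesA (A : List Int) (a b : Int) : List (Int × Int) :=
  (PySem.List.pyRange a b 1).filterMap (fun i =>
    match PySem.List.pyGet? A i with
    | some v => if 0 < v then some (-v, i) else none
    | none => none)

-- A's while loop; fuel only makes it total (n+1 iterations always suffice: each pop consumes
-- one of the ≤ n distinct entries ever put).  (`result` in A is dead for the return value.)
def pvLoopA (A : List Int) (n : Int) : Nat → List (Int × Int) → Int → Int → Int → Int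
  | 0, _, energy, _, cnt => if energy < n - 1 then -1 else cnt
  | fuel + 1, q, energy, last, cnt =>
    match pvQGet q with
    | none => if energy < n - 1 then -1 else cnt
    | some ((snack, _ind), q') =>
      let cnt' := cnt + 1
      let energy' := energy - snack
      if n - 1 ≤ energy' then cnt'
      else pvLoopA A n fuel (q' ++ pvPushesA A (last + 1) (energy' + 1)) energy' energy' cnt'

def zbigniew1 (A : List Int) : Int :=
  let n : Int := A.length
  pvLoopA A n (A.length + 1) [(-(pvAget A 0), 0)] 0 0 0

-- ===== PORT B =====
-- "i is a better snack than b": larger A[i], ties toward the smaller index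
def pvBetter (A : List Int) (i b : Int) : Bool :=
  decide (pvAget A b < pvAget A i ∨ (pvAget A i = pvAget A b ∧ i < b))

-- the `for i in range(reached+1, energy+1): if A[i] > 0: avail.append(i)`
def pvPushesB (A : List Int) (a b : Int) : List Int :=
  (PySem.List.pyRange a b 1).filterMap (fun i =>
    match PySem.List.pyGet? A i with
    | some v => if 0 < v then some i else none
    | none => none)

-- B's while loop; fuel only makes it total (n iterations always suffice)
def pvLoopB (A : List Int) (n : Int) : Nat → List Int → Int → Int → Int → Int
  | fuel, avail, energy, reached, cnt =>
    if n - 1 ≤ energy then cnt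
    else
      match fuel with
      | 0 => -1
      | fuel + 1 =>
        match avail ++ pvPushesB A (reached + 1) (energy + 1) with
        | [] => -1
        | b0 :: rest =>
          let best := (b0 :: rest).foldl (fun b i => if pvBetter A i b then i else b) b0
          let avail3 := (PySem.List.remove? (b0 :: rest) best).getD (b0 :: rest)
          pvLoopB A n fuel avail3 (energy + pvAget A best) energy (cnt + 1)

def zbigniew1_alt (A : List Int) : Int :=
  let n : Int := A.length
  pvLoopB A n A.length [] (pvAget A 0) 0 1

-- ===== PRECONDITION & SPEC =====
-- Pre_ excludes only the empty list, on which Python A (and B) raise IndexError at A[0].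
def Pre_zbigniew1 (A : List Int) : Prop := A ≠ []
instance (A : List Int) : Decidable (Pre_zbigniew1 A) := by unfold Pre_zbigniew1; infer_instance
def pvWitness_zbigniew1 : List Int := [2, 1, 1]

def Spec_zbigniew1 (A : List Int) (out : Int) : Prop := out = zbigniew1_alt A
instance (A : List Int) (out : Int) : Decidable (Spec_zbigniew1 A out) := by unfold Spec_zbigniew1; infer_instance

-- ===== CLAIM (what is proved, stated in full; the proofs are below) =====
def Claim_equal_zbigniew1 : Prop := ∀ (A : List Int), Dom_zbigniew1 A → Pre_zbigniew1 A → Spec_zbigniew1 A (zbigniew1 A)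

-- ===== LEMMAS AND PROOFS =====

-- the map identifying B's candidate indices with A's queue entries
def pvF (A : List Int) (i : Int) : Int × Int := (-(pvAget A i), i)

theorem pvF_inj (A : List Int) : Function.Injective (pvF A) := by
  intro i j h
  simpa [pvF] using congrArg Prod.snd h

theorem pushes_map (A : List Int) (a b : Int) :
    pvPushesA A a b = (pvPushesB A a b).map (pvF A) := by
  unfold pvPushesA pvPushesB
  rw [List.map_filterMap]
  apply List.filterMap_congr
  intro i _
  cases h : PySem.List.pyGet? A i with
  | none => simp
  | some v => by_cases hv : 0 < v <;> simp [hv, pvF, pvAget, h]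

theorem pvLeq_refl (x : Int × Int) : pvLeq x x = true := by simp [pvLeq]

theorem pvLeq_total (x y : Int × Int) : pvLeq x y = true ∨ pvLeq y x = true := by
  simp [pvLeq]; omega

theorem pvLeq_trans {x y z : Int × Int} (h1 : pvLeq x y = true) (h2 : pvLeq y z = true) :
    pvLeq x z = true := by
  simp [pvLeq] at *; omega

theorem pvLeq_antisymm {x y : Int × Int} (h1 : pvLeq x y = true) (h2 : pvLeq y x = true) :
    x = y := by
  simp [pvLeq] at *
  exact Prod.ext_iff.2 ⟨by omega, by omega⟩

theorem pvQGet_eq_none_iff (q : List (Int × Int)) : pvQGet q = none ↔ q = [] := by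
  cases q with
  | nil => simp [pvQGet]
  | cons x xs =>
    simp only [pvQGet]
    cases pvQGet xs with
    | none => simp
    | some p => cases p with | mk m rest => by_cases h : pvLeq x m = true <;> simp [h]

theorem pvQGet_spec (q : List (Int × Int)) (m : Int × Int) (rest : List (Int × Int))
    (h : pvQGet q = some (m, rest)) :
    m ∈ q ∧ rest = q.erase m ∧ ∀ y ∈ q, pvLeq m y = true := by
  induction q generalizing m rest with
  | nil => simp [pvQGet] at h
  | cons x xs ih =>
    cases hx : pvQGet xs with
    | none =>
      have hxs : xs = [] := (pvQGet_eq_none_iff xs).1 hx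
      subst hxs
      simp only [pvQGet, Option.some.injEq, Prod.mk.injEq] at h
      obtain ⟨rfl, rfl⟩ := h
      refine ⟨by simp, by simp, ?_⟩
      intro y hy
      simp only [List.mem_singleton] at hy
      subst hy
      exact pvLeq_refl _
    | some p =>
      obtain ⟨m0, rest0⟩ := p
      obtain ⟨hm0, hrest0, hmin0⟩ := ih m0 rest0 hx
      simp only [pvQGet, hx] at h
      by_cases hle : pvLeq x m0 = true
      · rw [if_pos hle] at h
        simp only [Option.some.injEq, Prod.mk.injEq] at h
        obtain ⟨rfl, rfl⟩ := h
        refine ⟨by simp, by simp, ?_⟩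
        intro y hy
        rcases List.mem_cons.1 hy with rfl | hy
        · exact pvLeq_refl _
        · exact pvLeq_trans hle (hmin0 y hy)
      · rw [if_neg hle] at h
        simp only [Option.some.injEq, Prod.mk.injEq] at h
        obtain ⟨rfl, rfl⟩ := h
        have hge : pvLeq m0 x = true := (pvLeq_total x m0).resolve_left hle
        have hne : x ≠ m0 := by
          intro hxm; subst hxm; exact hle (pvLeq_refl _)
        refine ⟨by simp [hm0], ?_, ?_⟩
        · rw [List.erase_cons_tail (by simpa using hne), hrest0]
        · intro y hy
          rcases List.mem_cons.1 hy with rfl | hy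
          · exact hge
          · exact hmin0 y hy

-- B's scan returns an element of the list that is pvLeq-minimal under pvF
theorem pvScan_spec (A : List Int) (l : List Int) (b : Int) :
    ((l.foldl (fun b i => if pvBetter A i b then i else b) b) = b ∨
      (l.foldl (fun b i => if pvBetter A i b then i else b) b) ∈ l) ∧
    ∀ y, (y = b ∨ y ∈ l) →
      pvLeq (pvF A (l.foldl (fun b i => if pvBetter A i b then i else b) b)) (pvF A y) = true := by
  induction l generalizing b with
  | nil =>
    refine ⟨Or.inl rfl, ?_⟩
    intro y hy
    rcases hy with rfl | hy
    · exact pvLeq_refl _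
    · simp at hy
  | cons x l ih =>
    simp only [List.foldl_cons]
    obtain ⟨ihmem, ihmin⟩ := ih (b := if pvBetter A x b then x else b)
    constructor
    · rcases ihmem with h | h
      · rw [h]; by_cases hb : pvBetter A x b = true <;> simp [hb]
      · exact Or.inr (List.mem_cons.2 (Or.inr h))
    · intro y hy
      have step_le_b : pvLeq (pvF A (if pvBetter A x b then x else b)) (pvF A b) = true := by
        by_cases hb : pvBetter A x b = true
        · simp only [hb, if_true]
          simp [pvBetter] at hb
          simp [pvLeq, pvF]; omega
        · simp [hb, pvLeq_refl]
      have step_le_x : pvLeq (pvF A (if pvBetter A x b then x else b)) (pvF A x) = true := by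
        by_cases hb : pvBetter A x b = true
        · simp [hb, pvLeq_refl]
        · simp only [hb]
          simp [pvBetter] at hb
          simp [pvLeq, pvF]
          omega
      rcases hy with rfl | hy
      · exact pvLeq_trans (ihmin _ (Or.inl rfl)) step_le_b
      · rcases List.mem_cons.1 hy with rfl | hy
        · exact pvLeq_trans (ihmin _ (Or.inl rfl)) step_le_x
        · exact ihmin y (Or.inr hy)

-- popping A's queue = B's scan-and-remove, through the map pvF
theorem pvQGet_map (A : List Int) (b0 : Int) (rest : List Int) :
    pvQGet ((b0 :: rest).map (pvF A)) =
      some (pvF A ((b0 :: rest).foldl (fun b i => if pvBetter A i b then i else b) b0),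
        ((b0 :: rest).erase ((b0 :: rest).foldl (fun b i => if pvBetter A i b then i else b) b0)).map (pvF A)) := by
  set best := (b0 :: rest).foldl (fun b i => if pvBetter A i b then i else b) b0 with hbest
  obtain ⟨hmem, hmin⟩ := pvScan_spec A (b0 :: rest) b0
  have hbmem : best ∈ b0 :: rest := by
    rcases hmem with h | h
    · rw [hbest, h]; simp
    · exact h
  have hbmin : ∀ y ∈ b0 :: rest, pvLeq (pvF A best) (pvF A y) = true := by
    intro y hy
    rcases List.mem_cons.1 hy with rfl | hy
    · exact hmin y (Or.inl rfl)
    · exact hmin y (Or.inr (List.mem_cons.2 (Or.inr hy)))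
  cases hq : pvQGet ((b0 :: rest).map (pvF A)) with
  | none =>
    exact absurd ((pvQGet_eq_none_iff _).1 hq) (by simp)
  | some p =>
    obtain ⟨m, rest'⟩ := p
    obtain ⟨hm, hrest', hmmin⟩ := pvQGet_spec _ m rest' hq
    obtain ⟨j, hj, rfl⟩ := List.mem_map.1 hm
    have h1 : pvLeq (pvF A best) (pvF A j) = true := hbmin j hj
    have h2 : pvLeq (pvF A j) (pvF A best) = true :=
      hmmin _ (List.mem_map.2 ⟨best, hbmem, rfl⟩)
    have heq : pvF A j = pvF A best := pvLeq_antisymm h2 h1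
    rw [heq] at hrest' ⊢
    rw [hrest', ← List.map_erase (pvF_inj A)]

-- one simulation invariant: B's loop equals A's loop on the queue B's candidates denote
theorem sim (A : List Int) (n : Int) (fuel : Nat) :
    ∀ (avail : List Int) (energy reached cnt : Int),
    pvLoopB A n fuel avail energy reached cnt =
      if n - 1 ≤ energy then cnt
      else pvLoopA A n fuel ((avail ++ pvPushesB A (reached + 1) (energy + 1)).map (pvF A))
        energy energy cnt := by
  induction fuel with
  | zero =>
    intro avail energy reached cnt
    simp only [pvLoopB, pvLoopA]
    split_ifs with h1 h2 <;> first | rfl | omega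
  | succ fuel ih =>
    intro avail energy reached cnt
    by_cases h1 : n - 1 ≤ energy
    · simp only [pvLoopB]
      rw [if_pos h1, if_pos h1]
    · simp only [pvLoopB]
      rw [if_neg h1, if_neg h1]
      cases havail : avail ++ pvPushesB A (reached + 1) (energy + 1) with
      | nil =>
        simp only [pvLoopA, List.map_nil, pvQGet]
        rw [if_pos (by omega)]
      | cons b0 rest =>
        simp only [pvLoopA]
        rw [pvQGet_map]
        set best := (b0 :: rest).foldl (fun b i => if pvBetter A i b then i else b) b0 with hbest
        have hbmem : best ∈ b0 :: rest := by
          rcases (pvScan_spec A (b0 :: rest) b0).1 with h | h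
          · rw [hbest, h]; simp
          · exact h
        have hremove : (PySem.List.remove? (b0 :: rest) best).getD (b0 :: rest) =
            (b0 :: rest).erase best := by
          rw [PySem.List.remove?_eq_some_erase (b0 :: rest) best hbmem, Option.getD_some]
        simp only [pvF, hremove]
        have henergy : energy - -pvAget A best = energy + pvAget A best := by ring
        rw [henergy]
        by_cases h2 : n - 1 ≤ energy + pvAget A best
        · rw [if_pos h2, ih, if_pos h2]
        · rw [if_neg h2, ih, if_neg h2]
          rw [List.map_append, pushes_map]

-- ===== VERDICT (by name: the statement is the Claim_ definition above) =====
theorem zbigniew1_spec : Claim_equal_zbigniew1 := by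
  intro A _hDom _hPre
  unfold Spec_zbigniew1 zbigniew1 zbigniew1_alt
  rw [sim]
  simp only [pvLoopA, pvQGet]
  have h0 : (0 : Int) - -pvAget A 0 = pvAget A 0 := by ring
  rw [h0]
  by_cases h : (A.length : Int) - 1 ≤ pvAget A 0
  · rw [if_pos h, if_pos h]; norm_num
  · rw [if_neg h, if_neg h]
    rw [List.nil_append, List.nil_append, pushes_map, zero_add]
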